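-- pv_equiv track=rewrite | github.com/In-Network-Machine-Learning/Planter | src/models/KM/Type_clustreams/table_generator.py | relative_code_lookup
-- ===== SOURCE A (Python) =====
-- def relative_code_lookup(idx, num_features, feature_num, look_up, label):
--     if feature_num ==num_features:
--         code = ''
--         for f in range(num_features):
--             code += str(int(idx[f]))
--         look_up[code] = label
--         label += 1
--         return look_up, label
--     else:
--         for r in [0,1]:
--             idx[feature_num] = r
--             feature_num+=1
--             look_up,label = relative_code_lookup(idx,num_features,feature_num, look_up, label)
--             feature_num-=1
--     return look_up, label
-- ===== SOURCE B (Python) =====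
-- def relative_code_lookup(idx, num_features, feature_num, look_up, label):
--     k = num_features - feature_num
--     prefix = ''.join(str(int(idx[f])) for f in range(feature_num))
--     for i in range(2 ** k):
--         bits = ''.join(str(i // 2 ** (k - 1 - b) % 2) for b in range(k))
--         look_up[prefix + bits] = label
--         label += 1
--     return look_up, label
-- ===== Notes on version B (the rewrite author's own statement) =====
-- stated objective: idiomatic
-- what changed: Replaces the binary recursion over feature positions with a single flat loop over range(2**k) that derives each code's bit string arithmetically from the loop counter, appended to the fixed prefix computed once; Pre_ excludes feature_num > num_features (A recurses without bound / raises) and negative feature_num below num_features, where A's negative-index writes into idx produce accidental codes.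
-- outside the precondition, e.g. on relative_code_lookup([5], 0, -1, {}, 0): A returns ({'': 1}, 2), B returns ({'0': 0, '1': 1}, 2)
import Mathlib
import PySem

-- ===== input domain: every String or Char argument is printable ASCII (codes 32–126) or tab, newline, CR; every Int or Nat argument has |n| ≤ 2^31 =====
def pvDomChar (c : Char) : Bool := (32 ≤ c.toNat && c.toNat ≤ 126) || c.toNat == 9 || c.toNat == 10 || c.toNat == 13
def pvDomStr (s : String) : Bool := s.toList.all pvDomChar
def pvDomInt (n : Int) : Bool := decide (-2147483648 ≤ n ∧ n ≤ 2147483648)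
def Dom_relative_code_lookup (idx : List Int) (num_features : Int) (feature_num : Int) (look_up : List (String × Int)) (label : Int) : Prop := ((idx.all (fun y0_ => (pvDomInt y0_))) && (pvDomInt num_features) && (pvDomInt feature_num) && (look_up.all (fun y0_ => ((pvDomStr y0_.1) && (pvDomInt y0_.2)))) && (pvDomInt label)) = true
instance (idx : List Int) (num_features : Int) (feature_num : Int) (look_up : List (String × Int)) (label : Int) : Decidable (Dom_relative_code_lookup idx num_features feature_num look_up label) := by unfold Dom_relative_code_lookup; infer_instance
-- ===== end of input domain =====

-- B replaces A's binary recursion by one flat loop over range(2^k), deriving each code's digits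
-- arithmetically from the loop counter (objective: idiomatic). Equivalence is about the RETURN
-- value: A also mutates idx in place during its recursion, B never writes to idx.

-- ===== PORT A =====
-- string concatenation of str(int(idx[f])) for f in range(n) (this join appears in both Pythons)
def pvJoinCode (idx : List Int) (n : Int) : String :=
  (PySem.List.pyRange 0 n 1).foldl (fun c f => c ++ PySem.Int.toStr (PySem.List.pyGetD idx f 0)) ""

-- A's recursion, with a fuel guard only to totalize the (feature_num > num_features ⇒ Python diverges) case
def pvGoA (fuel : Nat) (idx : List Int) (nf fn : Int) (lu : PySem.Dict String Int) (lab : Int) :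
    List Int × PySem.Dict String Int × Int :=
  if fn = nf then
    (idx, lu.insert (pvJoinCode idx nf) lab, lab + 1)
  else
    match fuel with
    | 0 => (idx, lu, lab)
    | fuel' + 1 =>
      ([0, 1] : List Int).foldl
        (fun st r =>
          pvGoA fuel' (PySem.List.pySetD st.1 fn r) nf (fn + 1) st.2.1 st.2.2)
        (idx, lu, lab)

def relative_code_lookup (idx : List Int) (num_features : Int) (feature_num : Int) (look_up : List (String × Int)) (label : Int) : (List (String × Int)) × Int :=
  ((pvGoA (num_features - feature_num).toNat idx num_features feature_num (PySem.Dict.mk look_up) label).2.1.items,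
   (pvGoA (num_features - feature_num).toNat idx num_features feature_num (PySem.Dict.mk look_up) label).2.2)

-- ===== PORT B =====
-- ''.join(str(i // 2 ** (k - 1 - b) % 2) for b in range(k)): Python's '2 ** (k-1-b)' has a
-- nonnegative exponent for every b in range(k), so '.toNat' on the exponent is exact there
def pvBitsB (i k : Int) : String :=
  (PySem.List.pyRange 0 k 1).foldl
    (fun s b => s ++ PySem.Int.toStr (PySem.Int.mod (PySem.Int.floordiv i (2 ^ (k - 1 - b).toNat)) 2)) ""

-- 'range(2 ** k)': k ≥ 0 whenever Source B returns (negative k raises), so '2 ^ k.toNat' is exact there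
def relative_code_lookup_alt (idx : List Int) (num_features : Int) (feature_num : Int) (look_up : List (String × Int)) (label : Int) : (List (String × Int)) × Int :=
  let k := num_features - feature_num
  let pfx := pvJoinCode idx feature_num
  let res := (PySem.List.pyRange 0 ((2 ^ k.toNat : Nat) : Int) 1).foldl
      (fun (st : PySem.Dict String Int × Int) i =>
        (st.1.insert (pfx ++ pvBitsB i k) st.2, st.2 + 1))
      (PySem.Dict.mk look_up, label)
  (res.1.items, res.2)

-- ===== PRECONDITION & SPEC =====
-- Pre_ excludes exactly the inputs on which A does not return normally (feature_num > num_features: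
-- unbounded recursion; num_features beyond len(idx): IndexError) and the inputs with negative
-- feature_num < num_features, where A's negative-index wraparound writes produce accidental codes.
def Pre_relative_code_lookup (idx : List Int) (num_features : Int) (feature_num : Int) (look_up : List (String × Int)) (label : Int) : Prop :=
  (0 ≤ feature_num ∨ feature_num = num_features) ∧ feature_num ≤ num_features ∧
    (num_features ≤ (idx.length : Int) ∨ num_features ≤ 0)
instance (idx : List Int) (num_features : Int) (feature_num : Int) (look_up : List (String × Int)) (label : Int) : Decidable (Pre_relative_code_lookup idx num_features feature_num look_up label) := by unfold Pre_relative_code_lookup; infer_instance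

def pvWitness_relative_code_lookup : List Int × Int × Int × (List (String × Int)) × Int :=
  ([0, 0, 7], 2, 0, [("x", 9)], 5)

def Spec_relative_code_lookup (idx : List Int) (num_features : Int) (feature_num : Int) (look_up : List (String × Int)) (label : Int) (out : (List (String × Int)) × Int) : Prop := out = relative_code_lookup_alt idx num_features feature_num look_up label
instance (idx : List Int) (num_features : Int) (feature_num : Int) (look_up : List (String × Int)) (label : Int) (out : (List (String × Int)) × Int) : Decidable (Spec_relative_code_lookup idx num_features feature_num look_up label out) := by unfold Spec_relative_code_lookup; infer_instance

-- ===== CLAIM (what is proved, stated in full; the proofs are below) =====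
def Claim_equal_relative_code_lookup : Prop := ∀ (idx : List Int) (num_features : Int) (feature_num : Int) (look_up : List (String × Int)) (label : Int), Dom_relative_code_lookup idx num_features feature_num look_up label → Pre_relative_code_lookup idx num_features feature_num look_up label → Spec_relative_code_lookup idx num_features feature_num look_up label (relative_code_lookup idx num_features feature_num look_up label)

-- ===== LEMMAS AND PROOFS =====

-- Nat-level view of one digit of B's code, and of B's digit string (proof-only helpers)
def pvDigit (k j b : Nat) : Nat := j / 2 ^ (k - 1 - b) % 2

def pvBitsN (k j : Nat) : String :=
  (List.range k).foldl (fun s b => s ++ PySem.Int.toStr (pvDigit k j b)) ""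

lemma pvStrFold_factor (g : Nat → String) (l : List Nat) (s0 : String) :
    l.foldl (fun s b => s ++ g b) s0 = s0 ++ l.foldl (fun s b => s ++ g b) "" := by
  induction l generalizing s0 with
  | nil => simp
  | cons a t ih =>
    simp only [List.foldl_cons]
    rw [ih (s0 ++ g a), ih (("" : String) ++ g a)]
    simp [String.append_assoc]

lemma pvBitsB_natCast (k j : Nat) : pvBitsB (j : Int) (k : Int) = pvBitsN k j := by
  unfold pvBitsB pvBitsN
  rw [PySem.List.pyRange_one]
  simp only [sub_zero, Int.toNat_natCast, List.foldl_map, zero_add]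
  apply PySem.List.foldl_congr_mem
  intro acc b hb
  rw [List.mem_range] at hb
  have he : ((k : Int) - 1 - (b : Int)).toNat = k - 1 - b := by omega
  have hp : ((2 : Int) ^ (k - 1 - b)) = ((2 ^ (k - 1 - b) : Nat) : Int) := by push_cast; ring
  rw [he, hp, PySem.Int.floordiv_natCast, show ((2:Int)) = ((2:Nat):Int) from rfl,
    PySem.Int.mod_natCast]
  rfl

lemma pvBitsN_succ (k j : Nat) :
    pvBitsN (k + 1) j = PySem.Int.toStr (pvDigit (k + 1) j 0) ++
      (List.range k).foldl (fun s b => s ++ PySem.Int.toStr (pvDigit (k + 1) j (b + 1))) "" := by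
  unfold pvBitsN
  rw [List.range_succ_eq_map]
  simp only [List.foldl_cons, List.foldl_map]
  rw [pvStrFold_factor (fun b => PySem.Int.toStr (pvDigit (k + 1) j (b + 1)))]
  simp

lemma pvBitsN_low (k j : Nat) (h : j < 2 ^ k) :
    pvBitsN (k + 1) j = "0" ++ pvBitsN k j := by
  rw [pvBitsN_succ]
  have h0 : pvDigit (k + 1) j 0 = 0 := by
    unfold pvDigit
    simp only [Nat.add_sub_cancel, Nat.sub_zero]
    rw [Nat.div_eq_of_lt h]
  rw [h0]
  unfold pvBitsN
  congr 1
  apply PySem.List.foldl_congr_mem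
  intro acc b hb
  rw [List.mem_range] at hb
  have he : k + 1 - 1 - (b + 1) = k - 1 - b := by omega
  unfold pvDigit
  rw [he]

lemma pvBitsN_high (k j : Nat) (h : j < 2 ^ k) :
    pvBitsN (k + 1) (2 ^ k + j) = "1" ++ pvBitsN k j := by
  rw [pvBitsN_succ]
  have h0 : pvDigit (k + 1) (2 ^ k + j) 0 = 1 := by
    unfold pvDigit
    simp only [Nat.add_sub_cancel, Nat.sub_zero]
    rw [Nat.add_div_left j (by positivity), Nat.div_eq_of_lt h]
  rw [h0]
  unfold pvBitsN
  congr 1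
  apply PySem.List.foldl_congr_mem
  intro acc b hb
  rw [List.mem_range] at hb
  have hd : pvDigit (k + 1) (2 ^ k + j) (b + 1) = pvDigit k j b := by
    unfold pvDigit
    have he : k + 1 - 1 - (b + 1) = k - 1 - b := by omega
    rw [he]
    set m := k - 1 - b with hm
    have hkm : 2 ^ k = 2 ^ (b + 1) * 2 ^ m := by
      rw [← pow_add]
      congr 1
      omega
    rw [hkm, Nat.add_comm, Nat.add_mul_div_right _ _ (by positivity)]
    have : 2 ^ (b + 1) = 2 ^ b * 2 := by ring
    rw [this, Nat.add_mul_mod_self_right]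
  rw [hd]

-- B's flat loop over List.range, with digits at the Nat level (proof-only helper)
def pvFoldB (k : Nat) (pfx : String) (st : PySem.Dict String Int × Int) : PySem.Dict String Int × Int :=
  (List.range (2 ^ k)).foldl
    (fun (st : PySem.Dict String Int × Int) (j : Nat) =>
      (st.1.insert (pfx ++ pvBitsN k j) st.2, st.2 + 1)) st

lemma pvAlt_fold (k : Nat) (pfx : String) (lu : PySem.Dict String Int) (lab : Int) :
    (PySem.List.pyRange 0 ((2 ^ k : Nat) : Int) 1).foldl
      (fun (st : PySem.Dict String Int × Int) i => (st.1.insert (pfx ++ pvBitsB i (k : Int)) st.2, st.2 + 1))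
      (lu, lab) = pvFoldB k pfx (lu, lab) := by
  rw [PySem.List.pyRange_one]
  simp only [sub_zero, Int.toNat_natCast, zero_add, List.foldl_map]
  unfold pvFoldB
  apply PySem.List.foldl_congr_mem
  intro acc j _
  rw [pvBitsB_natCast]

lemma pvBitsN_zero (j : Nat) : pvBitsN 0 j = "" := rfl

lemma pvFoldB_zero (pfx : String) (lu : PySem.Dict String Int) (lab : Int) :
    pvFoldB 0 pfx (lu, lab) = (lu.insert pfx lab, lab + 1) := by
  unfold pvFoldB
  rw [pow_zero, List.range_one]
  simp only [List.foldl_cons, List.foldl_nil, pvBitsN_zero, String.append_empty]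

lemma pvFoldB_succ (k : Nat) (pfx : String) (st : PySem.Dict String Int × Int) :
    pvFoldB (k + 1) pfx st = pvFoldB k (pfx ++ "1") (pvFoldB k (pfx ++ "0") st) := by
  unfold pvFoldB
  rw [show 2 ^ (k + 1) = 2 ^ k + 2 ^ k by ring, List.range_add, List.foldl_append, List.foldl_map]
  have e0 : (List.range (2 ^ k)).foldl
      (fun (st : PySem.Dict String Int × Int) (j : Nat) =>
        (st.1.insert (pfx ++ pvBitsN (k + 1) j) st.2, st.2 + 1)) st
      = (List.range (2 ^ k)).foldl
      (fun (st : PySem.Dict String Int × Int) (j : Nat) =>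
        (st.1.insert ((pfx ++ "0") ++ pvBitsN k j) st.2, st.2 + 1)) st := by
    apply PySem.List.foldl_congr_mem
    intro acc x hx
    rw [List.mem_range] at hx
    rw [pvBitsN_low k x hx, String.append_assoc]
  rw [e0]
  apply PySem.List.foldl_congr_mem
  intro acc x hx
  rw [List.mem_range] at hx
  show (acc.1.insert (pfx ++ pvBitsN (k + 1) (2 ^ k + x)) acc.2, acc.2 + 1) = _
  rw [pvBitsN_high k x hx, String.append_assoc]

lemma pvJoinCode_congr (a b : List Int) (n : Int)
    (h : ∀ j : Nat, (j : Int) < n → a.getD j 0 = b.getD j 0) :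
    pvJoinCode a n = pvJoinCode b n := by
  unfold pvJoinCode
  apply PySem.List.foldl_congr_mem
  intro acc x hx
  rw [PySem.List.mem_pyRange_one] at hx
  have h0 : (0:Int) ≤ x := hx.1
  rw [PySem.List.pyGetD_of_nonneg _ _ h0, PySem.List.pyGetD_of_nonneg _ _ h0,
    h x.toNat (by omega)]

lemma pvJoinCode_snoc (idx : List Int) (fn : Int) (r : Int) (h0 : 0 ≤ fn)
    (hlt : fn < (idx.length : Int)) :
    pvJoinCode (PySem.List.pySetD idx fn r) (fn + 1) = pvJoinCode idx fn ++ PySem.Int.toStr r := by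
  unfold pvJoinCode
  rw [PySem.List.pyRange_one_succ_right h0, List.foldl_append]
  simp only [List.foldl_cons, List.foldl_nil]
  have hset : PySem.List.pySetD idx fn r = idx.set fn.toNat r :=
    PySem.List.pySetD_of_nonneg _ _ h0
  congr 1
  · apply PySem.List.foldl_congr_mem
    intro acc x hx
    rw [PySem.List.mem_pyRange_one] at hx
    have h0x : (0:Int) ≤ x := hx.1
    rw [PySem.List.pyGetD_of_nonneg _ _ h0x, PySem.List.pyGetD_of_nonneg _ _ h0x, hset]
    rw [List.getD, List.getD, List.getElem?_set_ne (by omega)]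
  · rw [hset, PySem.List.pyGetD_of_nonneg _ _ h0]
    rw [List.getD, List.getElem?_set_self (by omega)]
    rfl

-- main invariant: A's recursion computes B's flat fold, preserving idx's length and its prefix below fn
lemma pvGoA_eq (k : Nat) :
    ∀ (idx : List Int) (nf fn : Int) (lu : PySem.Dict String Int) (lab : Int) (fuel : Nat),
      0 ≤ fn → fn + (k : Int) = nf → nf ≤ (idx.length : Int) → k ≤ fuel →
      (pvGoA fuel idx nf fn lu lab).1.length = idx.length ∧
      (∀ j : Nat, (j : Int) < fn → (pvGoA fuel idx nf fn lu lab).1.getD j 0 = idx.getD j 0) ∧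
      (pvGoA fuel idx nf fn lu lab).2 = pvFoldB k (pvJoinCode idx fn) (lu, lab) := by
  induction k with
  | zero =>
    intro idx nf fn lu lab fuel h0 hk hlen hf
    have hfn : fn = nf := by omega
    rw [pvGoA.eq_def, if_pos hfn, pvFoldB_zero]
    exact ⟨rfl, fun j _ => rfl, by rw [hfn]⟩
  | succ k ih =>
    intro idx nf fn lu lab fuel h0 hk hlen hf
    have hne : fn ≠ nf := by omega
    obtain ⟨fuel', rfl⟩ : ∃ f', fuel = f' + 1 := ⟨fuel - 1, by omega⟩
    rw [pvGoA.eq_def, if_neg hne]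
    simp only [List.foldl_cons, List.foldl_nil]
    have hflt : fn < (idx.length : Int) := by omega
    set idx0 := PySem.List.pySetD idx fn 0 with hidx0
    have hlen0 : idx0.length = idx.length := PySem.List.length_pySetD _ _ _
    obtain ⟨hL0, hP0, hD0⟩ := ih idx0 nf (fn + 1) lu lab fuel' (by omega) (by omega)
      (by omega) (by omega)
    set res0 := pvGoA fuel' idx0 nf (fn + 1) lu lab with hres0
    set idx1 := PySem.List.pySetD res0.1 fn 1 with hidx1
    have hlen1 : idx1.length = idx.length := by
      rw [hidx1, PySem.List.length_pySetD, hL0, hlen0]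
    obtain ⟨hL1, hP1, hD1⟩ := ih idx1 nf (fn + 1) res0.2.1 res0.2.2 fuel' (by omega) (by omega)
      (by omega) (by omega)
    set res1 := pvGoA fuel' idx1 nf (fn + 1) res0.2.1 res0.2.2 with hres1
    have hpre0 : ∀ j : Nat, (j : Int) < fn → idx0.getD j 0 = idx.getD j 0 := by
      intro j hj
      rw [hidx0, PySem.List.pySetD_of_nonneg _ _ h0, List.getD, List.getD,
        List.getElem?_set_ne (by omega)]
    have hpre1 : ∀ j : Nat, (j : Int) < fn → idx1.getD j 0 = idx.getD j 0 := by
      intro j hj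
      rw [hidx1, PySem.List.pySetD_of_nonneg _ _ h0, List.getD, List.getD,
        List.getElem?_set_ne (by omega), ← List.getD, ← List.getD, hP0 j (by omega),
        hpre0 j hj]
    refine ⟨by rw [hL1, hlen1], ?_, ?_⟩
    · intro j hj
      rw [hP1 j (by omega), hpre1 j hj]
    · have hcode0 : pvJoinCode idx0 (fn + 1) = pvJoinCode idx fn ++ "0" := by
        rw [hidx0, pvJoinCode_snoc idx fn 0 h0 hflt]; rfl
      have hcode1 : pvJoinCode idx1 (fn + 1) = pvJoinCode idx fn ++ "1" := by
        rw [hidx1, pvJoinCode_snoc res0.1 fn 1 h0 (by omega)]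
        rw [pvJoinCode_congr res0.1 idx fn (fun j hj => by rw [hP0 j (by omega), hpre0 j hj])]
        rfl
      rw [hD1, hcode1, pvFoldB_succ]
      congr 1
      rw [← hcode0, ← hD0]

-- ===== VERDICT (by name: the statement is the Claim_ definition above) =====
theorem relative_code_lookup_spec : Claim_equal_relative_code_lookup := by
  intro idx nf fn look_up lab _ hpre
  obtain ⟨h1, h2, h3⟩ := hpre
  unfold Spec_relative_code_lookup relative_code_lookup relative_code_lookup_alt
  simp only []
  have hk : nf - fn = (((nf - fn).toNat : Nat) : Int) := by omega
  rw [hk]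
  simp only [Int.toNat_natCast]
  rw [pvAlt_fold]
  by_cases hfn : fn = nf
  · subst hfn
    have hz : (fn - fn).toNat = 0 := by omega
    rw [hz, pvGoA.eq_def, if_pos rfl, pvFoldB_zero]
  · have h0 : 0 ≤ fn := by
      rcases h1 with h | h
      · exact h
      · exact absurd h hfn
    have hlen : nf ≤ (idx.length : Int) := by
      rcases h3 with h | h
      · exact h
      · omega
    obtain ⟨_, _, hD⟩ := pvGoA_eq (nf - fn).toNat idx nf fn (PySem.Dict.mk look_up) lab
      (nf - fn).toNat h0 (by omega) hlen (le_refl _)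
    rw [hD]
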